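-- pv_equiv track=rewrite | github.com/AudiusProject/audius-protocol | discovery-provider/alembic/versions/c8d2be7dcccc_repair_poorly_sorted_tracks.py | fix_segments
-- ===== SOURCE A (Python) =====
-- FMT = "segment%03d.ts"
--
-- def fix_segments(segments):
--     """
--     Fixes segments from a string sorted %03d order to a proper integer based order.
--
--     Currently, we observe incorrect segment orders of
--     099.ts
--     100.ts
--     1001.ts
--     1002.ts
--     ...
--     101.ts
--
--     This method takes in a list of segments and re orders them, returning the proper order.
--     It does this by replicating a sort on the %03d naming schema and captures the indexes that move
--     when that happens and then uses that relationship to back out what the original order should be.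
--     """
--     fixed_segments = [None] * len(segments)
--     # Produce tuples for the total length of segments (number, actual segment name), e.g. (0, segment000.ts)
--     tuples = [(i, FMT % i) for i in range(0, len(segments))]
--     # Sort segments by their stored file name fmt. This mirrors the error.
--     sorted_tuples = sorted(tuples, key=lambda x: x[1])
--
--     # Re-map out the tuples, capturing the actual index they should be at. This gives us
--     # {0: 0, 1: 1, ..., 101: 1000, ..., 111: 101, ...}
--     segment_map = {}
--     for i in range(len(sorted_tuples)):
--         proper_index = sorted_tuples[i][0]
--         segment_map[i] = proper_index
--
--     # Produce our final order and return
--     for mapping in segment_map.items():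
--         fixed_segments[mapping[1]] = segments[mapping[0]]
--
--     return fixed_segments
-- ===== SOURCE B (Python) =====
-- def fix_segments(segments):
--     """Reorder segments from string-sorted "segment%03d.ts" order to integer order.
--
--     Instead of formatting every name and running a comparison sort (what A does),
--     generate the string-sorted order of 0..n-1 directly: it is the preorder walk
--     of the decimal-string trie (a number comes right before every number whose
--     decimal string extends it, because '.' sorts before any digit).  Numbers
--     below 100 are zero-padded to three digits, so nothing extends them.
--     """
--     n = len(segments)
--     order = []
--     def emit(m):
--         if m < n:
--             order.append(m)
--             c = m * 10
--             if c < n: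
--                 for d in range(c, min(c + 10, n)):
--                     emit(d)
--     for m in range(min(n, 100)):
--         order.append(m)
--     for m in range(100, 1000):
--         emit(m)
--     fixed = [None] * n
--     for pos, m in enumerate(order):
--         fixed[m] = segments[pos]
--     return fixed
-- ===== Notes on version B (the rewrite author's own statement) =====
-- stated objective: faster
-- what changed: B drops A's name-formatting + comparison sort + index dictionary entirely and instead generates the string-sorted order of 0..n-1 directly as a preorder walk of the decimal-string trie (a number precedes exactly the numbers whose decimal string extends it, since '.' sorts before every digit), then places each segment in one pass.
import Mathlib
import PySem

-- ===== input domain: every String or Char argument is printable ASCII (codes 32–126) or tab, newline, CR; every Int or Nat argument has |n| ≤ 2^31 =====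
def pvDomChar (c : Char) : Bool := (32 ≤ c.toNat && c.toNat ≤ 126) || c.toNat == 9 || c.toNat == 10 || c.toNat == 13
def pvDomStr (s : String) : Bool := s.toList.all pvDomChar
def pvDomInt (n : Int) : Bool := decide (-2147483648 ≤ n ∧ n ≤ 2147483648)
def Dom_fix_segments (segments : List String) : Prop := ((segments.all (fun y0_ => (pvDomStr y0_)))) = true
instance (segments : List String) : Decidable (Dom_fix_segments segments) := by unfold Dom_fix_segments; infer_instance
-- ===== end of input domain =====

-- B replaces A's "format every index, comparison-sort the names, invert through a dict" with a direct
-- generation of the string-sorted order (preorder walk of the decimal-string trie); equivalence of the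
-- RETURN values is what is proved.

-- ===== PORT A =====
-- FMT % i, i.e. "segment%03d.ts" % i: exact for the nonnegative i A uses (str(i) zero-padded to width 3)
def pvFmt (i : Int) : String :=
  String.ofList ("segment".toList ++ PySem.Chars.zfill (PySem.Int.toChars i) 3 ++ ".ts".toList)

def fix_segments (segments : List String) : List String :=
  -- fixed_segments = [None] * len(segments); "" stands for None (A overwrites every slot before returning)
  let fixed0 : List String := List.replicate segments.length ""
  -- tuples = [(i, FMT % i) for i in range(0, len(segments))]
  let tuples : List (Int × String) :=
    (PySem.List.pyRange 0 (segments.length : Int) 1).map (fun i => (i, pvFmt i))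
  -- sorted_tuples = sorted(tuples, key=lambda x: x[1])
  let sorted_tuples := PySem.List.sorted tuples (fun x => x.2)
  -- segment_map = {}; for i in range(len(sorted_tuples)): segment_map[i] = sorted_tuples[i][0]
  let segment_map : PySem.Dict Int Int :=
    (PySem.List.pyRange 0 (sorted_tuples.length : Int) 1).foldl
      (fun d i => d.insert i (PySem.List.pyGetD sorted_tuples i (0, "")).1) PySem.Dict.empty
  -- for mapping in segment_map.items(): fixed_segments[mapping[1]] = segments[mapping[0]]
  segment_map.items.foldl
    (fun fx mapping => PySem.List.pySetD fx mapping.2 (PySem.List.pyGetD segments mapping.1 ""))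
    fixed0

-- ===== PORT B =====
-- emit(m): if m < n: order.append(m); c = m*10; if c < n: for d in range(c, min(c+10, n)): emit(d)
def pvEmit (n m : Nat) (hm : 1 ≤ m) : List Nat :=
  if _h : m < n then
    m :: (if m * 10 < n then
            (List.range' (m * 10) (min (m * 10 + 10) n - m * 10)).attach.flatMap
              (fun d => pvEmit n d.1 (by have := d.2; rw [List.mem_range'] at this; omega))
          else [])
  else []
termination_by n - m
decreasing_by have := d.2; rw [List.mem_range'] at this; omega

-- order = list(range(min(n,100))); for m in range(100,1000): emit(m)
def pvOrder (n : Nat) : List Nat :=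
  List.range (min n 100) ++
    (List.range' 100 900).attach.flatMap
      (fun m => pvEmit n m.1 (by have := m.2; rw [List.mem_range'] at this; omega))

def fix_segments_alt (segments : List String) : List String :=
  let n := segments.length
  let order := pvOrder n
  -- fixed = [None]*n; for pos, m in enumerate(order): fixed[m] = segments[pos]
  (PySem.List.enumerate order).foldl
    (fun fx pm => fx.set pm.2 (PySem.List.pyGetD segments pm.1 "")) (List.replicate n "")

-- ===== PRECONDITION & SPEC =====
def Spec_fix_segments (segments : List String) (out : List String) : Prop := out = fix_segments_alt segments
instance (segments : List String) (out : List String) : Decidable (Spec_fix_segments segments out) := by unfold Spec_fix_segments; infer_instance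

-- ===== CLAIM (what is proved, stated in full; the proofs are below) =====
def Claim_equal_fix_segments : Prop := ∀ (segments : List String), Dom_fix_segments segments → Spec_fix_segments segments (fix_segments segments)

-- ===== LEMMAS AND PROOFS =====

-- str(x) for a natural number, through the PySem primitive
theorem pvToChars_natCast (x : Nat) : PySem.Int.toChars (x : Int) = Nat.toDigits 10 x := by
  simp [PySem.Int.toChars]

-- str(10*m+d) = str(m) + digit d   (m ≥ 1)
theorem pvCore_acc (f : Nat) : ∀ (n : Nat) (ds : List Char),
    Nat.toDigitsCore 10 f n ds = Nat.toDigitsCore 10 f n [] ++ ds := by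
  induction f with
  | zero => intro n ds; rw [Nat.toDigitsCore, Nat.toDigitsCore]; simp
  | succ g ih =>
    intro n ds
    rw [Nat.toDigitsCore, Nat.toDigitsCore]
    by_cases h : n / 10 = 0
    · simp [h]
    · simp only [h]
      rw [ih (n/10) ((n % 10).digitChar :: ds), ih (n/10) [(n % 10).digitChar]]
      simp
theorem pvCore_fuel : ∀ (n f g : Nat), n < f → n < g →
    Nat.toDigitsCore 10 f n [] = Nat.toDigitsCore 10 g n [] := by
  intro n
  induction n using Nat.strong_induction_on with
  | _ n ih =>
    intro f g hf hg
    obtain ⟨f', rfl⟩ : ∃ f', f = f' + 1 := ⟨f - 1, by omega⟩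
    obtain ⟨g', rfl⟩ : ∃ g', g = g' + 1 := ⟨g - 1, by omega⟩
    rw [Nat.toDigitsCore, Nat.toDigitsCore]
    by_cases h : n / 10 = 0
    · simp [h]
    · simp only [h]
      rw [pvCore_acc f' (n/10), pvCore_acc g' (n/10)]
      have hn : n / 10 < n := Nat.div_lt_self (by omega) (by omega)
      rw [ih (n/10) hn f' g' (by omega) (by omega)]
theorem pvDS_step (m d : Nat) (hm : 1 ≤ m) (hd : d < 10) :
    Nat.toDigits 10 (10 * m + d) = Nat.toDigits 10 m ++ [Nat.digitChar d] := by
  unfold Nat.toDigits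
  rw [Nat.toDigitsCore]
  have hdiv : (10 * m + d) / 10 = m := by omega
  have hmod : (10 * m + d) % 10 = d := by omega
  simp only [hdiv, hmod]
  rw [if_neg (by omega)]
  rw [pvCore_acc (10 * m + d) m]
  rw [pvCore_fuel m (10 * m + d) (m + 1) (by omega) (by omega)]

theorem pvDS_single (m : Nat) (h : m < 10) : Nat.toDigits 10 m = [Nat.digitChar m] := by
  unfold Nat.toDigits
  rw [Nat.toDigitsCore]
  simp [Nat.div_eq_of_lt h, Nat.mod_eq_of_lt h]

theorem pvDS_ne_nil (n : Nat) : Nat.toDigits 10 n ≠ [] := by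
  unfold Nat.toDigits
  rw [Nat.toDigitsCore]
  by_cases h : n / 10 = 0
  · simp [h]
  · rw [if_neg h, pvCore_acc]
    simp

theorem pvDS_len (k : Nat) : ∀ (m : Nat), 10 ^ k ≤ m → k + 1 ≤ (Nat.toDigits 10 m).length := by
  induction k with
  | zero =>
    intro m _
    have := pvDS_ne_nil m
    cases h : Nat.toDigits 10 m with
    | nil => exact absurd h this
    | cons a t => simp
  | succ k ih =>
    intro m hm
    have h10 : 10 ≤ m := le_trans (by calc (10:Nat) = 10^1 := by ring
                                      _ ≤ 10 ^ (k+1) := Nat.pow_le_pow_right (by omega) (by omega)) hm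
    have hstep := pvDS_step (m / 10) (m % 10) (by omega) (by omega)
    have hm' : 10 * (m / 10) + m % 10 = m := by omega
    rw [hm'] at hstep
    rw [hstep]
    have h1 : 10 ^ k ≤ m / 10 := by
      rw [Nat.le_div_iff_mul_le (by omega)]
      calc 10 ^ k * 10 = 10 ^ (k+1) := by ring
        _ ≤ m := hm
    have := ih (m / 10) h1
    simp
    omega

theorem pvZfill_self (cs : List Char) (h : 3 ≤ cs.length) : PySem.Chars.zfill cs 3 = cs := by
  unfold PySem.Chars.zfill
  rw [if_pos (by exact_mod_cast h)]

theorem pvPad_self {m : Nat} (h : 100 ≤ m) :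
    PySem.Chars.zfill (Nat.toDigits 10 m) 3 = Nat.toDigits 10 m :=
  pvZfill_self _ (by have := pvDS_len 2 m (by norm_num; omega); omega)

theorem pvDS_two {m : Nat} (h1 : 10 ≤ m) (h2 : m < 100) :
    Nat.toDigits 10 m = [Nat.digitChar (m / 10), Nat.digitChar (m % 10)] := by
  have hstep := pvDS_step (m / 10) (m % 10) (by omega) (by omega)
  have hm' : 10 * (m / 10) + m % 10 = m := by omega
  rw [hm'] at hstep
  rw [hstep, pvDS_single (m / 10) (by omega)]
  rfl

theorem pvDS_three {m : Nat} (h1 : 100 ≤ m) (h2 : m < 1000) :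
    Nat.toDigits 10 m = [Nat.digitChar (m / 100), Nat.digitChar (m / 10 % 10), Nat.digitChar (m % 10)] := by
  have hstep := pvDS_step (m / 10) (m % 10) (by omega) (by omega)
  have hm' : 10 * (m / 10) + m % 10 = m := by omega
  rw [hm'] at hstep
  rw [hstep, pvDS_two (m := m / 10) (by omega) (by omega)]
  have : m / 10 / 10 = m / 100 := by omega
  rw [this]
  rfl

theorem pvDigitChar_not_sign {d : Nat} (h : d < 10) :
    ¬ (Nat.digitChar d = '+' ∨ Nat.digitChar d = '-') := by
  interval_cases d <;> decide

theorem pvPad_lt1000 {m : Nat} (h : m < 1000) :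
    PySem.Chars.zfill (Nat.toDigits 10 m) 3 =
      [Nat.digitChar (m / 100), Nat.digitChar (m / 10 % 10), Nat.digitChar (m % 10)] := by
  by_cases h1 : m < 10
  · rw [pvDS_single m h1]
    unfold PySem.Chars.zfill
    rw [if_neg (by simp)]
    simp only [pvDigitChar_not_sign h1]
    have e1 : m / 100 = 0 := by omega
    have e2 : m / 10 % 10 = 0 := by omega
    have e3 : m % 10 = m := by omega
    rw [e1, e2, e3]
    rfl
  · by_cases h2 : m < 100
    · rw [pvDS_two (by omega) h2]
      unfold PySem.Chars.zfill
      rw [if_neg (by simp)]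
      simp only [pvDigitChar_not_sign (show m / 10 < 10 by omega)]
      have e1 : m / 100 = 0 := by omega
      have e2 : m / 10 % 10 = m / 10 := by omega
      rw [e1, e2]
      simp [show Nat.digitChar 0 = '0' from rfl]
    · rw [pvDS_three (by omega) h, pvZfill_self _ (by simp)]


theorem pvDigitChar_lt {d1 d2 : Nat} (h : d1 < d2) (h2 : d2 < 10) :
    Nat.digitChar d1 < Nat.digitChar d2 := by
  have h1 : d1 < 10 := by omega
  interval_cases d1 <;> interval_cases d2 <;> simp_all <;> decide

theorem pvDigitChar_dot {d : Nat} (h : d < 10) : '.' < Nat.digitChar d := by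
  interval_cases d <;> decide

theorem pvLtAppend (u : List Char) {c1 c2 : Char} (r1 r2 : List Char) (h : c1 < c2) :
    u ++ c1 :: r1 < u ++ c2 :: r2 := by
  induction u with
  | nil => exact List.cons_lt_cons_iff.2 (Or.inl h)
  | cons a t ih => exact List.cons_lt_cons_iff.2 (Or.inr ⟨rfl, ih⟩)

-- the key string, on the character-list side
def pvKey (x : Nat) : List Char :=
  "segment".toList ++ PySem.Chars.zfill (Nat.toDigits 10 x) 3 ++ ".ts".toList

theorem pvFmt_lt_iff (a b : Nat) : pvFmt (a : Int) < pvFmt (b : Int) ↔ pvKey a < pvKey b := by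
  simp [pvFmt, String.lt_iff_toList_lt, pvToChars_natCast, pvKey]

-- the relation the sort must realise
def pvR (a b : Nat) : Prop := pvFmt (a : Int) < pvFmt (b : Int)

-- the digit string of every x in [m*10^k, (m+1)*10^k) extends the digit string of m by k digits
theorem pvDiv_interval {m k x : Nat} (h1 : m * 10 ^ k ≤ x) (h2 : x < (m + 1) * 10 ^ k) :
    x / 10 ^ k = m :=
  Nat.div_eq_of_lt_le h1 h2

theorem pvDS_ext {m : Nat} (hm : 1 ≤ m) :
    ∀ (k x : Nat), m * 10 ^ k ≤ x → x < (m + 1) * 10 ^ k →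
    ∃ t, Nat.toDigits 10 x = Nat.toDigits 10 m ++ t ∧ t.length = k ∧ ∀ c ∈ t, '.' < c := by
  intro k
  induction k with
  | zero =>
    intro x h1 h2
    have hx : x = m := by simp [pow_zero] at h1 h2; omega
    exact ⟨[], by simp [hx]⟩
  | succ k ih =>
    intro x h1 h2
    have hp : (0:Nat) < 10 ^ k := by positivity
    have hq1 : m * 10 ^ k ≤ x / 10 := by
      rw [Nat.le_div_iff_mul_le (by omega)]
      calc m * 10 ^ k * 10 = m * 10 ^ (k+1) := by ring
        _ ≤ x := h1
    have hq2 : x / 10 < (m + 1) * 10 ^ k := by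
      rw [Nat.div_lt_iff_lt_mul (by omega)]
      calc x < (m + 1) * 10 ^ (k+1) := h2
        _ = (m + 1) * 10 ^ k * 10 := by ring
    obtain ⟨t, ht, hl, hc⟩ := ih (x / 10) hq1 hq2
    have hx10 : 10 ≤ x := by
      have : 10 ≤ m * 10 ^ (k+1) := by
        calc (10:Nat) = 1 * 10 ^ 1 := by norm_num
          _ ≤ m * 10 ^ (k+1) := Nat.mul_le_mul hm (Nat.pow_le_pow_right (by omega) (by omega))
      omega
    have hstep := pvDS_step (x / 10) (x % 10) (by omega) (by omega)
    have hx' : 10 * (x / 10) + x % 10 = x := by omega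
    rw [hx'] at hstep
    refine ⟨t ++ [Nat.digitChar (x % 10)], ?_, by simp [hl], ?_⟩
    · rw [hstep, ht]; simp
    · intro c hc'
      rcases List.mem_append.1 hc' with h | h
      · exact hc c h
      · simp at h; subst h; exact pvDigitChar_dot (by omega)

theorem pvDisjoint {a b x j k : Nat} (hab : a ≠ b) (h1 : a < 10 * b) (h2 : b < 10 * a)
    (ha1 : a * 10 ^ k ≤ x) (ha2 : x < (a + 1) * 10 ^ k)
    (hb1 : b * 10 ^ j ≤ x) (hb2 : x < (b + 1) * 10 ^ j) : False := by
  have key : ∀ (a b j k : Nat), a ≠ b → a < 10 * b → k ≤ j →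
      a * 10 ^ k ≤ x → x < (a + 1) * 10 ^ k → b * 10 ^ j ≤ x → x < (b + 1) * 10 ^ j → False := by
    intro a b j k hab h1 hkj ha1 ha2 hb1 hb2
    have ea : x / 10 ^ k = a := pvDiv_interval ha1 ha2
    have eb : x / 10 ^ j = b := pvDiv_interval hb1 hb2
    have hsplit : 10 ^ j = 10 ^ k * 10 ^ (j - k) := by
      rw [← pow_add]; congr 1; omega
    have : b = a / 10 ^ (j - k) := by
      rw [← ea, ← eb, hsplit, Nat.div_div_eq_div_mul]
    rcases Nat.eq_or_lt_of_le hkj with h | h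
    · exact hab (by rw [← ea, ← eb, ← h])
    · have h10 : (10:Nat) ≤ 10 ^ (j - k) := by
        calc (10:Nat) = 10 ^ 1 := by norm_num
          _ ≤ 10 ^ (j - k) := Nat.pow_le_pow_right (by omega) (by omega)
      have : b ≤ a / 10 := by
        rw [this]
        exact Nat.div_le_div_left h10 (by omega)
      have : 10 * b ≤ a := by
        have := Nat.mul_le_mul_left 10 this
        have h2 := Nat.mul_div_le a 10
        omega
      omega
  rcases le_total k j with h | h
  · exact key a b j k hab h1 h ha1 ha2 hb1 hb2
  · exact key b a k j (Ne.symm hab) h2 h hb1 hb2 ha1 ha2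

theorem pvMem_pvEmit {n m : Nat} (hm : 1 ≤ m) {x : Nat} :
    x ∈ pvEmit n m hm ↔ x < n ∧ ∃ k, m * 10 ^ k ≤ x ∧ x < (m + 1) * 10 ^ k := by
  suffices h : ∀ g m (hm : 1 ≤ m), n - m ≤ g → ∀ x : Nat, (x ∈ pvEmit n m hm ↔ x < n ∧ ∃ k, m * 10 ^ k ≤ x ∧ x < (m + 1) * 10 ^ k) by
    exact h (n-m) m hm le_rfl x
  intro g
  induction g with
  | zero =>
    intro m hm hg x
    rw [pvEmit, dif_neg (by omega)]
    simp only [List.not_mem_nil, false_iff]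
    rintro ⟨hx, k, h1, h2⟩
    have hp : (0:Nat) < 10^k := by positivity
    have hmx : m ≤ x := le_trans (Nat.le_mul_of_pos_right m hp) h1
    omega
  | succ g ih =>
    intro m hm hg x
    by_cases hmn : m < n
    · rw [pvEmit, dif_pos hmn]
      constructor
      · intro hx
        rcases List.mem_cons.1 hx with rfl | hx
        · exact ⟨hmn, 0, by simp⟩
        · by_cases hc : m * 10 < n
          · rw [if_pos hc] at hx
            rcases List.mem_flatMap.1 hx with ⟨⟨d, hd⟩, -, hxd⟩
            dsimp only at hxd
            rw [List.mem_range'] at hd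
            have hdb : m * 10 ≤ d ∧ d < m * 10 + 10 := by omega
            obtain ⟨hxn, k, h1, h2⟩ := (ih d (by omega) (by omega) x).1 hxd
            refine ⟨hxn, k+1, ?_, ?_⟩
            · calc m * 10 ^ (k+1) = m*10 * 10^k := by ring
                _ ≤ d * 10^k := Nat.mul_le_mul_right _ (by omega)
                _ ≤ x := h1
            · calc x < (d+1) * 10^k := h2
                _ ≤ (m+1)*10 * 10^k := Nat.mul_le_mul_right _ (by omega)
                _ = (m+1) * 10^(k+1) := by ring
          · rw [if_neg hc] at hx
            simp at hx
      · rintro ⟨hxn, k, h1, h2⟩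
        cases k with
        | zero =>
          simp only [pow_zero, mul_one] at h1 h2
          have hx : x = m := by omega
          exact List.mem_cons.2 (Or.inl hx)
        | succ k =>
          refine List.mem_cons.2 (Or.inr ?_)
          have hp : (0:Nat) < 10^k := by positivity
          have hq1 : m*10 ≤ x / 10^k := by
            rw [Nat.le_div_iff_mul_le hp]
            calc m*10*10^k = m*10^(k+1) := by ring
              _ ≤ x := h1
          have hq2 : x / 10^k < (m+1)*10 := by
            rw [Nat.div_lt_iff_lt_mul hp]
            calc x < (m+1)*10^(k+1) := h2
              _ = (m+1)*10*10^k := by ring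
          have hqn : x / 10^k < n := by
            have := Nat.div_le_self x (10^k)
            omega
          have hc : m * 10 < n := by omega
          rw [if_pos hc]
          refine List.mem_flatMap.2 ⟨⟨x / 10^k, ?_⟩, List.mem_attach _ _, ?_⟩
          · rw [List.mem_range']
            exact ⟨x / 10^k - m*10, by omega, by omega⟩
          · dsimp only
            rw [ih (x / 10^k) (by omega) (by omega) x]
            refine ⟨hxn, k, Nat.div_mul_le_self x (10^k), ?_⟩
            have h3 : x % 10^k < 10^k := Nat.mod_lt x hp
            calc x = 10^k * (x / 10^k) + x % 10^k := (Nat.div_add_mod x (10^k)).symm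
              _ < 10^k * (x / 10^k) + 10^k := by omega
              _ = (x / 10^k + 1)*10^k := by ring
    · rw [pvEmit, dif_neg hmn]
      simp only [List.not_mem_nil, false_iff]
      rintro ⟨hx, k, h1, h2⟩
      have hp : (0:Nat) < 10^k := by positivity
      have hmx : m ≤ x := le_trans (Nat.le_mul_of_pos_right m hp) h1
      omega

theorem pvNodup_pvEmit {n m : Nat} (hm : 1 ≤ m) : (pvEmit n m hm).Nodup := by
  suffices h : ∀ g m (hm : 1 ≤ m), n - m ≤ g → (pvEmit n m hm).Nodup from h (n-m) m hm le_rfl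
  intro g
  induction g with
  | zero =>
    intro m hm hg
    rw [pvEmit, dif_neg (by omega)]
    exact List.nodup_nil
  | succ g ih =>
    intro m hm hg
    by_cases hmn : m < n
    · rw [pvEmit, dif_pos hmn]
      by_cases hc : m * 10 < n
      · rw [if_pos hc]
        refine List.nodup_cons.2 ⟨?_, ?_⟩
        · intro hmem
          rcases List.mem_flatMap.1 hmem with ⟨⟨d, hd⟩, -, hxd⟩
          dsimp only at hxd
          rw [List.mem_range'] at hd
          obtain ⟨-, k, h1, -⟩ := (pvMem_pvEmit _).1 hxd
          have hp : (0:Nat) < 10^k := by positivity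
          have : d ≤ m := le_trans (Nat.le_mul_of_pos_right _ hp) h1
          omega
        · rw [List.nodup_flatMap]
          constructor
          · rintro ⟨d, hd⟩ -
            dsimp only
            rw [List.mem_range'] at hd
            exact ih d (by omega) (by omega)
          · unfold List.attach List.attachWith
            rw [List.pairwise_pmap]
            refine (List.pairwise_lt_range' 1).imp_of_mem ?_
            intro d1 d2 h1 h2 hlt hh1 hh2 x hx1 hx2
            rw [List.mem_range'] at h1 h2
            dsimp only at hx1 hx2
            obtain ⟨-, k, ha1, ha2⟩ := (pvMem_pvEmit _).1 hx1
            obtain ⟨-, j, hb1, hb2⟩ := (pvMem_pvEmit _).1 hx2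
            exact pvDisjoint (a := d1) (b := d2) (by omega) (by omega) (by omega) ha1 ha2 hb1 hb2
      · rw [if_neg hc]
        simp
    · rw [pvEmit, dif_neg hmn]
      exact List.nodup_nil

theorem pvSeg_ts : ".ts".toList = ['.', 't', 's'] := rfl

-- every element of pvEmit n m is ≥ 100 and its padded digit string extends m's
theorem pvEmit_ext {n m x : Nat} (hm : 1 ≤ m) (h100 : 100 ≤ m) (hx : x ∈ pvEmit n m hm) :
    100 ≤ x ∧ ∃ s, PySem.Chars.zfill (Nat.toDigits 10 x) 3 = PySem.Chars.zfill (Nat.toDigits 10 m) 3 ++ s := by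
  obtain ⟨-, k, h1, h2⟩ := (pvMem_pvEmit hm).1 hx
  have hp : (0:Nat) < 10^k := by positivity
  have hmx : m ≤ x := le_trans (Nat.le_mul_of_pos_right _ hp) h1
  obtain ⟨t, ht, -, -⟩ := pvDS_ext hm k x h1 h2
  exact ⟨by omega, t, by rw [pvPad_self h100, pvPad_self (by omega), ht]⟩

theorem pvPairwise_pvEmit {n m : Nat} (hm : 1 ≤ m) (h100 : 100 ≤ m) :
    (pvEmit n m hm).Pairwise pvR := by
  suffices h : ∀ g m (hm : 1 ≤ m), 100 ≤ m → n - m ≤ g → (pvEmit n m hm).Pairwise pvR from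
    h (n-m) m hm h100 le_rfl
  intro g
  induction g with
  | zero =>
    intro m hm h100 hg
    rw [pvEmit, dif_neg (by omega)]
    exact List.Pairwise.nil
  | succ g ih =>
    intro m hm h100 hg
    by_cases hmn : m < n
    · rw [pvEmit, dif_pos hmn]
      by_cases hc : m * 10 < n
      · rw [if_pos hc]
        refine List.pairwise_cons.2 ⟨?_, ?_⟩
        · -- m precedes every strict descendant
          intro y hy
          rcases List.mem_flatMap.1 hy with ⟨⟨d, hd⟩, -, hyd⟩
          dsimp only at hyd
          rw [List.mem_range'] at hd
          obtain ⟨-, k, h1, h2⟩ := (pvMem_pvEmit _).1 hyd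
          have hy1 : m * 10 ^ (k+1) ≤ y := by
            calc m * 10 ^ (k+1) = m*10 * 10^k := by ring
              _ ≤ d * 10^k := Nat.mul_le_mul_right _ (by omega)
              _ ≤ y := h1
          have hy2 : y < (m + 1) * 10 ^ (k+1) := by
            calc y < (d+1) * 10^k := h2
              _ ≤ (m+1)*10 * 10^k := Nat.mul_le_mul_right _ (by omega)
              _ = (m+1) * 10^(k+1) := by ring
          obtain ⟨t, ht, hl, hdig⟩ := pvDS_ext hm (k+1) y hy1 hy2
          have hp : (0:Nat) < 10^(k+1) := by positivity
          have hmy : m ≤ y := le_trans (Nat.le_mul_of_pos_right _ hp) hy1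
          show pvFmt (m : Int) < pvFmt (y : Int)
          rw [pvFmt_lt_iff]
          rw [pvKey, pvKey, pvPad_self h100, pvPad_self (by omega), ht]
          cases t with
          | nil => simp at hl
          | cons c t' =>
            have hdot : '.' < c := hdig c (by simp)
            have e1 : "segment".toList ++ Nat.toDigits 10 m ++ ".ts".toList
                = ("segment".toList ++ Nat.toDigits 10 m) ++ '.' :: ['t','s'] := by
              simp [pvSeg_ts]
            have e2 : "segment".toList ++ (Nat.toDigits 10 m ++ c :: t') ++ ".ts".toList
                = ("segment".toList ++ Nat.toDigits 10 m) ++ c :: (t' ++ ['.','t','s']) := by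
              simp [pvSeg_ts]
            rw [e1, e2]
            exact pvLtAppend _ _ _ hdot
        · rw [List.pairwise_flatMap]
          constructor
          · rintro ⟨d, hd⟩ -
            dsimp only
            rw [List.mem_range'] at hd
            exact ih d (by omega) (by omega) (by omega)
          · unfold List.attach List.attachWith
            rw [List.pairwise_pmap]
            refine (List.pairwise_lt_range' 1).imp_of_mem ?_
            intro d1 d2 h1 h2 hlt hh1 hh2 x hx y hy
            rw [List.mem_range'] at h1 h2
            dsimp only at hx hy
            obtain ⟨hx100, ⟨s, hs⟩⟩ := pvEmit_ext _ (by omega) hx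
            obtain ⟨hy100, ⟨t, ht⟩⟩ := pvEmit_ext _ (by omega) hy
            show pvFmt (x : Int) < pvFmt (y : Int)
            have hsd1 : Nat.toDigits 10 d1 = Nat.toDigits 10 m ++ [Nat.digitChar (d1 - m*10)] := by
              have h' := pvDS_step m (d1 - m*10) hm (by omega)
              rw [show 10*m + (d1 - m*10) = d1 from by omega] at h'
              exact h'
            have hsd2 : Nat.toDigits 10 d2 = Nat.toDigits 10 m ++ [Nat.digitChar (d2 - m*10)] := by
              have h' := pvDS_step m (d2 - m*10) hm (by omega)
              rw [show 10*m + (d2 - m*10) = d2 from by omega] at h'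
              exact h'
            rw [pvFmt_lt_iff, pvKey, pvKey, hs, ht,
                pvPad_self (show (100:Nat) ≤ d1 by omega), pvPad_self (show (100:Nat) ≤ d2 by omega),
                hsd1, hsd2]
            have e1 : "segment".toList ++ (Nat.toDigits 10 m ++ [Nat.digitChar (d1 - m*10)] ++ s) ++ ".ts".toList
                = ("segment".toList ++ Nat.toDigits 10 m) ++ Nat.digitChar (d1 - m*10) :: (s ++ ".ts".toList) := by simp
            have e2 : "segment".toList ++ (Nat.toDigits 10 m ++ [Nat.digitChar (d2 - m*10)] ++ t) ++ ".ts".toList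
                = ("segment".toList ++ Nat.toDigits 10 m) ++ Nat.digitChar (d2 - m*10) :: (t ++ ".ts".toList) := by simp
            rw [e1, e2]
            exact pvLtAppend _ _ _ (pvDigitChar_lt (by omega) (by omega))
      · rw [if_neg hc]
        exact List.pairwise_singleton _ _
    · rw [pvEmit, dif_neg hmn]
      exact List.Pairwise.nil

theorem pvAncestor : ∀ (x : Nat), 100 ≤ x →
    ∃ m k, 100 ≤ m ∧ m < 1000 ∧ m * 10 ^ k ≤ x ∧ x < (m + 1) * 10 ^ k := by
  intro x
  induction x using Nat.strong_induction_on with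
  | _ x ih =>
    intro hx
    by_cases h : x < 1000
    · exact ⟨x, 0, hx, h, by simp, by simp⟩
    · obtain ⟨m, k, hm1, hm2, h1, h2⟩ := ih (x / 10) (by omega) (by omega)
      refine ⟨m, k + 1, hm1, hm2, ?_, ?_⟩
      · calc m * 10 ^ (k+1) = m * 10 ^ k * 10 := by ring
          _ ≤ x / 10 * 10 := Nat.mul_le_mul_right _ h1
          _ ≤ x := by omega
      · have : x / 10 + 1 ≤ (m + 1) * 10 ^ k := h2
        calc x < (x / 10 + 1) * 10 := by omega
          _ ≤ (m + 1) * 10 ^ k * 10 := Nat.mul_le_mul_right _ this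
          _ = (m + 1) * 10 ^ (k+1) := by ring


theorem pvMem_pvOrder {n x : Nat} : x ∈ pvOrder n ↔ x < n := by
  rw [pvOrder, List.mem_append]
  constructor
  · rintro (h | h)
    · have := List.mem_range.1 h; omega
    · rcases List.mem_flatMap.1 h with ⟨⟨m, hm⟩, -, hx⟩
      exact ((pvMem_pvEmit _).1 hx).1
  · intro hx
    by_cases h100 : x < 100
    · exact Or.inl (List.mem_range.2 (by omega))
    · right
      obtain ⟨m, k, hm1, hm2, h1, h2⟩ := pvAncestor x (by omega)
      refine List.mem_flatMap.2 ⟨⟨m, ?_⟩, List.mem_attach _ _, ?_⟩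
      · rw [List.mem_range']; exact ⟨m - 100, by omega, by omega⟩
      · exact (pvMem_pvEmit _).2 ⟨hx, k, h1, h2⟩


theorem pvNodup_pvOrder (n : Nat) : (pvOrder n).Nodup := by
  rw [pvOrder]
  refine List.Nodup.append List.nodup_range ?_ ?_
  · rw [List.nodup_flatMap]
    refine ⟨fun a _ => pvNodup_pvEmit _, ?_⟩
    unfold List.attach List.attachWith
    rw [List.pairwise_pmap]
    refine (List.pairwise_lt_range' 1).imp_of_mem ?_
    intro m1 m2 h1 h2 hlt hh1 hh2 x hx1 hx2
    rw [List.mem_range'] at h1 h2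
    dsimp only at hx1 hx2
    obtain ⟨-, k, ha1, ha2⟩ := (pvMem_pvEmit _).1 hx1
    obtain ⟨-, j, hb1, hb2⟩ := (pvMem_pvEmit _).1 hx2
    exact pvDisjoint (by omega) (by omega) (by omega) ha1 ha2 hb1 hb2
  · intro a ha hb
    have ha' : a < 100 := by have := List.mem_range.1 ha; omega
    rcases List.mem_flatMap.1 hb with ⟨⟨m, hm⟩, -, hx⟩
    rw [List.mem_range'] at hm
    dsimp only at hx
    obtain ⟨-, k, h1, -⟩ := (pvMem_pvEmit _).1 hx
    have hp : (0:Nat) < 10^k := by positivity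
    have : m ≤ a := le_trans (Nat.le_mul_of_pos_right _ hp) h1
    omega


theorem pvPerm_pvOrder (n : Nat) : (pvOrder n).Perm (List.range n) := by
  rw [List.perm_ext_iff_of_nodup (pvNodup_pvOrder n) (List.nodup_range)]
  intro a
  rw [pvMem_pvOrder, List.mem_range]

theorem pvKey_lt_cross {a b x y : Nat} (hab : a < b) (hb : b < 1000)
    (hx : ∃ s, PySem.Chars.zfill (Nat.toDigits 10 x) 3 = PySem.Chars.zfill (Nat.toDigits 10 a) 3 ++ s)
    (hy : ∃ t, PySem.Chars.zfill (Nat.toDigits 10 y) 3 = PySem.Chars.zfill (Nat.toDigits 10 b) 3 ++ t) :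
    pvKey x < pvKey y := by
  obtain ⟨s, hs⟩ := hx
  obtain ⟨t, ht⟩ := hy
  rw [pvKey, pvKey, hs, ht, pvPad_lt1000 (by omega), pvPad_lt1000 hb]
  by_cases h1 : a / 100 < b / 100
  · have e1 : "segment".toList ++ ([Nat.digitChar (a/100), Nat.digitChar (a/10%10), Nat.digitChar (a%10)] ++ s) ++ ".ts".toList
        = "segment".toList ++ Nat.digitChar (a/100) :: ([Nat.digitChar (a/10%10), Nat.digitChar (a%10)] ++ s ++ ".ts".toList) := by simp
    have e2 : "segment".toList ++ ([Nat.digitChar (b/100), Nat.digitChar (b/10%10), Nat.digitChar (b%10)] ++ t) ++ ".ts".toList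
        = "segment".toList ++ Nat.digitChar (b/100) :: ([Nat.digitChar (b/10%10), Nat.digitChar (b%10)] ++ t ++ ".ts".toList) := by simp
    rw [e1, e2]
    exact pvLtAppend _ _ _ (pvDigitChar_lt h1 (by omega))
  · by_cases h2 : a / 100 = b / 100 ∧ a / 10 % 10 < b / 10 % 10
    · obtain ⟨h2a, h2b⟩ := h2
      have e1 : "segment".toList ++ ([Nat.digitChar (a/100), Nat.digitChar (a/10%10), Nat.digitChar (a%10)] ++ s) ++ ".ts".toList
          = ("segment".toList ++ [Nat.digitChar (a/100)]) ++ Nat.digitChar (a/10%10) :: ([Nat.digitChar (a%10)] ++ s ++ ".ts".toList) := by simp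
      have e2 : "segment".toList ++ ([Nat.digitChar (b/100), Nat.digitChar (b/10%10), Nat.digitChar (b%10)] ++ t) ++ ".ts".toList
          = ("segment".toList ++ [Nat.digitChar (b/100)]) ++ Nat.digitChar (b/10%10) :: ([Nat.digitChar (b%10)] ++ t ++ ".ts".toList) := by simp
      rw [e1, e2, h2a]
      exact pvLtAppend _ _ _ (pvDigitChar_lt h2b (by omega))
    · have h3a : a / 100 = b / 100 := by omega
      have h3b : a / 10 % 10 = b / 10 % 10 := by omega
      have h3c : a % 10 < b % 10 := by omega
      have e1 : "segment".toList ++ ([Nat.digitChar (a/100), Nat.digitChar (a/10%10), Nat.digitChar (a%10)] ++ s) ++ ".ts".toList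
          = ("segment".toList ++ [Nat.digitChar (a/100), Nat.digitChar (a/10%10)]) ++ Nat.digitChar (a%10) :: (s ++ ".ts".toList) := by simp
      have e2 : "segment".toList ++ ([Nat.digitChar (b/100), Nat.digitChar (b/10%10), Nat.digitChar (b%10)] ++ t) ++ ".ts".toList
          = ("segment".toList ++ [Nat.digitChar (b/100), Nat.digitChar (b/10%10)]) ++ Nat.digitChar (b%10) :: (t ++ ".ts".toList) := by simp
      rw [e1, e2, h3a, h3b]
      exact pvLtAppend _ _ _ (pvDigitChar_lt h3c (by omega))

theorem pvPairwise_pvOrder (n : Nat) : (pvOrder n).Pairwise pvR := by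
  rw [pvOrder, List.pairwise_append]
  refine ⟨?_, ?_, ?_⟩
  · refine List.pairwise_lt_range.imp_of_mem ?_
    intro a b ha hb hab
    have ha' : a < 100 := by have := List.mem_range.1 ha; omega
    have hb' : b < 100 := by have := List.mem_range.1 hb; omega
    show pvFmt (a : Int) < pvFmt (b : Int)
    rw [pvFmt_lt_iff]
    exact pvKey_lt_cross hab (by omega) ⟨[], by simp⟩ ⟨[], by simp⟩
  · rw [List.pairwise_flatMap]
    constructor
    · rintro ⟨m, hm⟩ -
      rw [List.mem_range'] at hm
      dsimp only
      exact pvPairwise_pvEmit _ (by omega)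
    · unfold List.attach List.attachWith
      rw [List.pairwise_pmap]
      refine (List.pairwise_lt_range' 1).imp_of_mem ?_
      intro m1 m2 h1 h2 hlt hh1 hh2 x hx y hy
      rw [List.mem_range'] at h1 h2
      dsimp only at hx hy
      obtain ⟨-, ⟨s, hs⟩⟩ := pvEmit_ext _ (by omega) hx
      obtain ⟨-, ⟨t, ht⟩⟩ := pvEmit_ext _ (by omega) hy
      show pvFmt (x : Int) < pvFmt (y : Int)
      rw [pvFmt_lt_iff]
      exact pvKey_lt_cross hlt (by omega) ⟨s, hs⟩ ⟨t, ht⟩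
  · intro a ha y hy
    have ha' : a < 100 := by have := List.mem_range.1 ha; omega
    rcases List.mem_flatMap.1 hy with ⟨⟨m, hm⟩, -, hx⟩
    rw [List.mem_range'] at hm
    dsimp only at hx
    obtain ⟨-, ⟨t, ht⟩⟩ := pvEmit_ext _ (by omega) hx
    show pvFmt (a : Int) < pvFmt (y : Int)
    rw [pvFmt_lt_iff]
    exact pvKey_lt_cross (show a < m by omega) (by omega) ⟨[], by simp⟩ ⟨t, ht⟩


-- the tuple each index is carried through A's sort as
def pvF (m : Nat) : Int × String := ((m : Int), pvFmt (m : Int))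

theorem pvOrder_len (n : Nat) : (pvOrder n).length = n :=
  ((pvPerm_pvOrder n).length_eq).trans List.length_range

theorem pvGetD_map_pvF (n k : Nat) (hk : k < n) :
    ((pvOrder n).map pvF).getD k (0, "") = pvF ((pvOrder n).getD k 0) := by
  have hk' : k < (pvOrder n).length := by rw [pvOrder_len]; exact hk
  rw [List.getD_eq_getElem?_getD, List.getD_eq_getElem?_getD, List.getElem?_map,
      List.getElem?_eq_getElem hk']
  rfl

theorem pvAB_eq (segments : List String) : fix_segments segments = fix_segments_alt segments := by
  unfold fix_segments fix_segments_alt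
  dsimp only
  have hsort : PySem.List.sorted ((PySem.List.pyRange 0 (segments.length:Int) 1).map (fun i => (i, pvFmt i))) (fun x => x.2)
      = (pvOrder segments.length).map pvF := by
    apply PySem.List.sorted_eq_of_perm_of_pairwise_lt
    · rw [PySem.List.pyRange_zero_nat, List.map_map]
      exact (pvPerm_pvOrder segments.length).map pvF
    · rw [List.pairwise_map]
      exact pvPairwise_pvOrder segments.length
  rw [hsort]
  rw [show ((pvOrder segments.length).map pvF).length = segments.length from by
      rw [List.length_map, pvOrder_len]]
  rw [PySem.Dict.items_foldl_insert_fresh (PySem.List.pyRange 0 (segments.length:Int) 1)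
      (fun i => i) (fun i => (PySem.List.pyGetD ((pvOrder segments.length).map pvF) i (0, "")).1)
      PySem.Dict.empty (by intro a _; simp) (by simpa using PySem.List.nodup_pyRange_one 0 segments.length)]
  have hemp : (PySem.Dict.empty : PySem.Dict Int Int).items = [] := rfl
  rw [hemp, List.nil_append]
  rw [List.foldl_map]
  rw [PySem.List.pyRange_zero_nat, List.foldl_map]
  rw [PySem.List.enumerate_eq_map_pyRange (pvOrder segments.length) 0, List.foldl_map]
  rw [PySem.List.len_eq, pvOrder_len, PySem.List.pyRange_zero_nat, List.foldl_map]
  apply PySem.List.foldl_congr_mem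
  intro acc k hk
  have hkn : k < segments.length := List.mem_range.1 hk
  simp only [PySem.List.pyGetD_natCast, pvGetD_map_pvF _ _ hkn, pvF, PySem.List.pySetD_natCast]

-- ===== VERDICT (by name: the statement is the Claim_ definition above) =====
theorem fix_segments_spec : Claim_equal_fix_segments := by
  intro segments _
  unfold Spec_fix_segments
  exact pvAB_eq segments
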